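-- pv_equiv track=rewrite | github.com/FilipKoncewicz/Roguelike_game | engine.py | check_boss_neighborhood
-- ===== SOURCE A (Python) =====
-- def check_boss_neighborhood(boss, player):
--     area = []
--     interior = []
--     neighborhood = []
--
--     min_boss = -2
--     max_boss = 2
--     min_around_boss = -3
--     max_around_boss = 3
--
--     for x in range(min_around_boss, max_around_boss + 1):
--         for y in range(min_around_boss, max_around_boss + 1):
--             area.append([x, y])
--
--     for x in range(min_boss, max_boss + 1):
--         for y in range(min_boss, max_boss + 1):
--             interior.append([x, y])
--
--     for position in area:
--         if position not in interior:
--             neighborhood.append(position)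
--
--     for position in neighborhood:
--         x = boss["position x"] + position[0]
--         y = boss["position y"] + position[1]
--         if [x, y] == [player["position x"], player["position y"]]:
--             return True
--     return False
-- ===== SOURCE B (Python) =====
-- def check_boss_neighborhood(boss, player):
--     dx = player["position x"] - boss["position x"]
--     dy = player["position y"] - boss["position y"]
--     return (-3 <= dx <= 3 and -3 <= dy <= 3) and not (-2 <= dx <= 2 and -2 <= dy <= 2)
-- ===== Notes on version B (the rewrite author's own statement) =====
-- stated objective: simpler
-- what changed: Replaces the grid-building loops, list-difference scan and final search with a closed-form arithmetic test on the offsets dx, dy between player and boss.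
import Mathlib
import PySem

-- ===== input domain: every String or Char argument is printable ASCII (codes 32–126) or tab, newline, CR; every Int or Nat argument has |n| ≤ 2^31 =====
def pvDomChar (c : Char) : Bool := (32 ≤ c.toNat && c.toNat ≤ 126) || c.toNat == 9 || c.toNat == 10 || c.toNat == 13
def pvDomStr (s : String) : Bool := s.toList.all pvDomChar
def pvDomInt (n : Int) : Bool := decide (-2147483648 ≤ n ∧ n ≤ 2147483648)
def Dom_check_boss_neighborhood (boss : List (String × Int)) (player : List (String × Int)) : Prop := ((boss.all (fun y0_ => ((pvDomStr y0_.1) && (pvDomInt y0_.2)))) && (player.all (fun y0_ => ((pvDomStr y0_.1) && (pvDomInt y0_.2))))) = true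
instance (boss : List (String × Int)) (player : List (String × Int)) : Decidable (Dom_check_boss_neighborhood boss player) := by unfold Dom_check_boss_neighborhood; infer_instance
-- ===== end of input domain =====

-- B replaces A's grid-building loops, list-difference scan and final search with one
-- closed-form arithmetic test on the offsets (dx, dy); objective: simpler.

-- ===== PORT A =====
-- area: for x in range(-3,4): for y in range(-3,4): area.append([x,y])
def pvAreaA : List (Int × Int) :=
  (PySem.List.pyRange (-3) 4 1).foldl
    (fun acc x => (PySem.List.pyRange (-3) 4 1).foldl (fun acc2 y => acc2 ++ [(x, y)]) acc) []

-- interior: for x in range(-2,3): for y in range(-2,3): interior.append([x,y])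
def pvInteriorA : List (Int × Int) :=
  (PySem.List.pyRange (-2) 3 1).foldl
    (fun acc x => (PySem.List.pyRange (-2) 3 1).foldl (fun acc2 y => acc2 ++ [(x, y)]) acc) []

-- final loop with early return
def pvLoopA (neigh : List (Int × Int)) (bx by_ px py : Int) : Bool :=
  match neigh with
  | [] => false
  | p :: t =>
    if bx + p.1 = px ∧ by_ + p.2 = py then true else pvLoopA t bx by_ px py

def check_boss_neighborhood (boss : List (String × Int)) (player : List (String × Int)) : Bool :=
  let neighborhood := pvAreaA.foldl (fun acc p => if p ∈ pvInteriorA then acc else acc ++ [p]) []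
  match (PySem.Dict.mk boss).get? "position x", (PySem.Dict.mk boss).get? "position y",
        (PySem.Dict.mk player).get? "position x", (PySem.Dict.mk player).get? "position y" with
  | some bx, some by_, some px, some py => pvLoopA neighborhood bx by_ px py
  | _, _, _, _ => false  -- KeyError: excluded by Pre_

-- ===== PORT B =====
def check_boss_neighborhood_alt (boss : List (String × Int)) (player : List (String × Int)) : Bool :=
  -- dx = player["position x"] - boss["position x"]; dy likewise; KeyError (none) cases excluded by Pre_
  match (PySem.Dict.mk player).get? "position x" with
  | none => false
  | some px =>
    match (PySem.Dict.mk boss).get? "position x" with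
    | none => false
    | some bx =>
      match (PySem.Dict.mk player).get? "position y" with
      | none => false
      | some py =>
        match (PySem.Dict.mk boss).get? "position y" with
        | none => false
        | some by_ =>
          let dx := px - bx
          let dy := py - by_
          (decide (-3 ≤ dx ∧ dx ≤ 3) && decide (-3 ≤ dy ∧ dy ≤ 3)) &&
            !(decide (-2 ≤ dx ∧ dx ≤ 2) && decide (-2 ≤ dy ∧ dy ≤ 2))

-- ===== PRECONDITION & SPEC =====
-- A (and B) raise KeyError when any of the four position keys is missing; Pre_ excludes exactly those.
def Pre_check_boss_neighborhood (boss : List (String × Int)) (player : List (String × Int)) : Prop :=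
  ((PySem.Dict.mk boss).get? "position x").isSome ∧ ((PySem.Dict.mk boss).get? "position y").isSome ∧
  ((PySem.Dict.mk player).get? "position x").isSome ∧ ((PySem.Dict.mk player).get? "position y").isSome

instance (boss : List (String × Int)) (player : List (String × Int)) : Decidable (Pre_check_boss_neighborhood boss player) := by
  unfold Pre_check_boss_neighborhood; infer_instance

def pvWitness_check_boss_neighborhood : (List (String × Int)) × (List (String × Int)) :=
  ([("position x", 0), ("position y", 0)], [("position x", 3), ("position y", 1)])

def Spec_check_boss_neighborhood (boss : List (String × Int)) (player : List (String × Int)) (out : Bool) : Prop := out = check_boss_neighborhood_alt boss player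
instance (boss : List (String × Int)) (player : List (String × Int)) (out : Bool) : Decidable (Spec_check_boss_neighborhood boss player out) := by unfold Spec_check_boss_neighborhood; infer_instance

-- ===== CLAIM (what is proved, stated in full; the proofs are below) =====
def Claim_equal_check_boss_neighborhood : Prop := ∀ (boss : List (String × Int)) (player : List (String × Int)), Dom_check_boss_neighborhood boss player → Pre_check_boss_neighborhood boss player → Spec_check_boss_neighborhood boss player (check_boss_neighborhood boss player)

-- ===== LEMMAS AND PROOFS =====

set_option maxHeartbeats 2000000 in
-- the loop with early return is the 'any'-style existence test over its list
theorem pvLoopA_any (l : List (Int × Int)) (bx by_ px py : Int) :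
    pvLoopA l bx by_ px py = decide (∃ p ∈ l, bx + p.1 = px ∧ by_ + p.2 = py) := by
  induction l with
  | nil => simp [pvLoopA]
  | cons p t ih =>
    simp only [pvLoopA, ih, List.mem_cons]
    split_ifs with hp
    · simp [hp]
    · simp [hp]

set_option maxHeartbeats 2000000 in
-- the loop over the concrete 24-cell ring equals the closed-form ring test
theorem pvLoopA_ring (bx by_ px py : Int) :
    pvLoopA (pvAreaA.foldl (fun acc p => if p ∈ pvInteriorA then acc else acc ++ [p]) []) bx by_ px py
      = ((decide (-3 ≤ px - bx ∧ px - bx ≤ 3) && decide (-3 ≤ py - by_ ∧ py - by_ ≤ 3)) &&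
          !(decide (-2 ≤ px - bx ∧ px - bx ≤ 2) && decide (-2 ≤ py - by_ ∧ py - by_ ≤ 2))) := by
  have h : (pvAreaA.foldl (fun acc p => if p ∈ pvInteriorA then acc else acc ++ [p]) []) =
      [(-3,-3),(-3,-2),(-3,-1),(-3,0),(-3,1),(-3,2),(-3,3),
       (-2,-3),(-2,3),(-1,-3),(-1,3),(0,-3),(0,3),(1,-3),(1,3),(2,-3),(2,3),
       (3,-3),(3,-2),(3,-1),(3,0),(3,1),(3,2),(3,3)] := by rfl
  rw [h, pvLoopA_any]
  simp only [← Bool.decide_and, ← decide_not]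
  rw [decide_eq_decide]
  simp only [List.mem_cons, List.not_mem_nil, or_false]
  constructor
  · rintro ⟨p, hp, h1, h2⟩
    rcases hp with h|h|h|h|h|h|h|h|h|h|h|h|h|h|h|h|h|h|h|h|h|h|h|h <;> subst h <;>
      simp only at h1 h2 <;> omega
  · rintro ⟨⟨h1, h2⟩, h3⟩
    by_cases hx3 : px - bx = -3
    · exact ⟨(-3, py - by_), by simp [Prod.ext_iff]; omega, by omega, by omega⟩
    · by_cases hx3' : px - bx = 3
      · exact ⟨(3, py - by_), by simp [Prod.ext_iff]; omega, by omega, by omega⟩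
      · by_cases hy3 : py - by_ = -3
        · exact ⟨(px - bx, -3), by simp [Prod.ext_iff]; omega, by omega, by omega⟩
        · exact ⟨(px - bx, 3), by simp [Prod.ext_iff]; omega, by omega, by omega⟩

theorem check_boss_neighborhood_spec : Claim_equal_check_boss_neighborhood := by
  intro boss player _ hpre
  obtain ⟨h1, h2, h3, h4⟩ := hpre
  unfold Spec_check_boss_neighborhood check_boss_neighborhood check_boss_neighborhood_alt
  obtain ⟨bx, hbx⟩ := Option.isSome_iff_exists.mp h1
  obtain ⟨by_, hby⟩ := Option.isSome_iff_exists.mp h2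
  obtain ⟨px, hpx⟩ := Option.isSome_iff_exists.mp h3
  obtain ⟨py, hpy⟩ := Option.isSome_iff_exists.mp h4
  simp only [hbx, hby, hpx, hpy]
  exact pvLoopA_ring bx by_ px py
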